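-- pv_equiv track=rewrite | github.com/Hagdos/Adventofcode | 2017/Day 21/Day 21.py | inputtopattern
-- ===== SOURCE A (Python) =====
-- def inputtopattern(inpattern):
--     pattern = []
--     line = []
--     for char in inpattern:
--         if char == '#':
--             line.append('1')
--         elif char == '.':
--             line.append('0')
--         else:
--             pattern.append(line)
--             line = []
--     pattern.append(line)
--     return pattern
-- ===== SOURCE B (Python) =====
-- import re
--
-- def inputtopattern(inpattern):
--     rows = re.split(r'[^#.]', inpattern)
--     return [['1' if c == '#' else '0' for c in row] for row in rows]
-- ===== Notes on version B (the rewrite author's own statement) =====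
-- stated objective: idiomatic
-- what changed: Replaced A's single-pass state machine (explicit line accumulator with a separator branch) with a split-then-map pipeline: re.split on [^#.] yields the rows, a comprehension translates each char.
import Mathlib
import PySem

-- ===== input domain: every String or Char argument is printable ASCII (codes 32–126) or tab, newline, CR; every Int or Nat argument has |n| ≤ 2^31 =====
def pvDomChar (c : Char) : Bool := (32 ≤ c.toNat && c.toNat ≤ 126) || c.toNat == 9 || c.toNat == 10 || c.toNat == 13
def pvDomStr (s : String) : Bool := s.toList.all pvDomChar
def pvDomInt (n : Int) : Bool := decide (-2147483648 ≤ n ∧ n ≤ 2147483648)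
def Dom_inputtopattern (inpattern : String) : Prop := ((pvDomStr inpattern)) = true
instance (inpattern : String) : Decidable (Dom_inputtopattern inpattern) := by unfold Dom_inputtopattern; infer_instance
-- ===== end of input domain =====

-- B replaces A's one-pass state machine by an idiomatic split-on-separators-then-map pipeline (same cost).

-- ===== PORT A =====
-- one step of A's loop body: state = (pattern, line)
def itpStep (st : List (List String) × List String) (c : Char) : List (List String) × List String :=
  if c = '#' then (st.1, st.2 ++ ["1"])
  else if c = '.' then (st.1, st.2 ++ ["0"])
  else (st.1 ++ [st.2], [])

def inputtopattern (inpattern : String) : List (List String) :=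
  let st := inpattern.toList.foldl itpStep ([], [])
  st.1 ++ [st.2]

-- ===== PORT B =====
-- separator predicate of re.split(r'[^#.]', …)
def itpSep (c : Char) : Bool := !(c = '#' || c = '.')
-- '1' if c == '#' else '0'
def itpTr (c : Char) : String := if c = '#' then "1" else "0"

def inputtopattern_alt (inpattern : String) : List (List String) :=
  (inpattern.toList.splitOnP itpSep).map (fun row => row.map itpTr)

-- ===== PRECONDITION & SPEC =====
def Spec_inputtopattern (inpattern : String) (out : List (List String)) : Prop := out = inputtopattern_alt inpattern
instance (inpattern : String) (out : List (List String)) : Decidable (Spec_inputtopattern inpattern out) := by unfold Spec_inputtopattern; infer_instance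

-- ===== CLAIM (what is proved, stated in full; the proofs are below) =====
def Claim_equal_inputtopattern : Prop := ∀ (inpattern : String), Dom_inputtopattern inpattern → Spec_inputtopattern inpattern (inputtopattern inpattern)

-- ===== LEMMAS AND PROOFS =====

theorem itp_splitOnP_ne_nil (l : List Char) : l.splitOnP itpSep ≠ [] := by
  induction l with
  | nil => simp [List.splitOnP_nil]
  | cons x xs ih =>
    rw [List.splitOnP_cons]
    split
    · simp
    · cases h : xs.splitOnP itpSep with
      | nil => exact absurd h ih
      | cons a t => simp

theorem itp_aux (l : List Char) (pat : List (List String)) (line : List String) :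
    (l.foldl itpStep (pat, line)).1 ++ [(l.foldl itpStep (pat, line)).2]
      = pat ++ (line ++ ((l.splitOnP itpSep).map (fun row => row.map itpTr)).headI)
              :: ((l.splitOnP itpSep).map (fun row => row.map itpTr)).tail := by
  induction l generalizing pat line with
  | nil => simp [List.splitOnP_nil]
  | cons x xs ih =>
    cases hs : xs.splitOnP itpSep with
    | nil => exact absurd hs (itp_splitOnP_ne_nil xs)
    | cons h t =>
      by_cases hsep : itpSep x = true
      · have hx1 : ¬ x = '#' := by
          intro hx; simp [itpSep, hx] at hsep
        have hx2 : ¬ x = '.' := by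
          intro hx; simp [itpSep, hx] at hsep
        rw [List.splitOnP_cons, if_pos hsep]
        simp only [List.foldl_cons, itpStep, if_neg hx1, if_neg hx2]
        rw [ih]
        simp [hs]
      · rw [List.splitOnP_cons, if_neg hsep]
        by_cases hx1 : x = '#'
        · simp only [List.foldl_cons, itpStep, if_pos hx1]
          rw [ih]
          simp [hs, hx1, itpTr]
        · have hx2 : x = '.' := by
            simp [itpSep, hx1] at hsep; exact hsep
          simp only [List.foldl_cons, itpStep, if_neg hx1, if_pos hx2]
          rw [ih]
          simp [hs, hx2, itpTr]

-- ===== VERDICT (by name: the statement is the Claim_ definition above) =====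
theorem inputtopattern_spec : Claim_equal_inputtopattern := by
  intro s _
  unfold Spec_inputtopattern inputtopattern inputtopattern_alt
  rw [itp_aux]
  cases hs : s.toList.splitOnP itpSep with
  | nil => exact absurd hs (itp_splitOnP_ne_nil s.toList)
  | cons h t => simp
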